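-- pv_equiv track=rewrite | github.com/kajalgpatel008/assessment_module | pythonAssesement1.py | count_spaces_digits
-- ===== SOURCE A (Python) =====
-- def count_spaces_digits(s):
--     spaces = digits = 0
--     for char in s:
--         if char == ' ':
--             spaces += 1
--         elif char.isdigit():
--             digits += 1
--     return spaces, digits
-- ===== SOURCE B (Python) =====
-- def count_spaces_digits(s):
--     cnt = {}
--     for ch in s:
--         cnt[ch] = cnt.get(ch, 0) + 1
--     spaces = cnt.get(' ', 0)
--     digits = sum(c for ch, c in cnt.items() if ch.isdigit())
--     return spaces, digits
-- ===== Notes on version B (the rewrite author's own statement) =====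
-- stated objective: alternative
-- what changed: B first builds a character-frequency dictionary in one pass and then derives spaces by a single lookup and digits by summing counts over the DISTINCT keys, instead of A's single if/elif counting pass over the character stream.
import Mathlib
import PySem

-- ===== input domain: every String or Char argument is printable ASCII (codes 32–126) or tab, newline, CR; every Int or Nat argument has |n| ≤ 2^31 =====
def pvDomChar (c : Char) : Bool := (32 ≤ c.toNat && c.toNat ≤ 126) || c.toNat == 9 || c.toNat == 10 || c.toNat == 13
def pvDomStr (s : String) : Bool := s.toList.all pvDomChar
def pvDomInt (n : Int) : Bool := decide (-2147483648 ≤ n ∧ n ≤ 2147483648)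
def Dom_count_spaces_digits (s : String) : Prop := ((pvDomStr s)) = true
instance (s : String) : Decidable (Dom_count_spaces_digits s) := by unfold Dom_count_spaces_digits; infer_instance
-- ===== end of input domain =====

-- B builds a character-frequency dictionary first and derives both counts from it
-- (one lookup for spaces, a sum over the DISTINCT keys for digits); alternative, not faster.

-- ===== PORT A =====
def count_spaces_digits (s : String) : Int × Int :=
  s.toList.foldl
    (fun acc c =>
      if c == ' ' then (acc.1 + 1, acc.2)
      else if PySem.Chars.isdigit c then (acc.1, acc.2 + 1)
      else acc)
    (0, 0)

-- ===== PORT B =====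
def count_spaces_digits_alt (s : String) : Int × Int :=
  let cnt : PySem.Dict Char Int :=
    s.toList.foldl (fun d ch => d.insert ch (d.getD ch 0 + 1)) PySem.Dict.empty
  let spaces : Int := cnt.getD ' ' 0
  let digits : Int :=
    cnt.items.foldl (fun acc kv => if PySem.Chars.isdigit kv.1 then acc + kv.2 else acc) 0
  (spaces, digits)

-- ===== PRECONDITION & SPEC =====
def Spec_count_spaces_digits (s : String) (out : Int × Int) : Prop := out = count_spaces_digits_alt s
instance (s : String) (out : Int × Int) : Decidable (Spec_count_spaces_digits s out) := by unfold Spec_count_spaces_digits; infer_instance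

-- ===== CLAIM (what is proved, stated in full; the proofs are below) =====
def Claim_equal_count_spaces_digits : Prop := ∀ (s : String), Dom_count_spaces_digits s → Spec_count_spaces_digits s (count_spaces_digits s)

-- ===== LEMMAS AND PROOFS =====

-- A's pass, characterised: it adds the number of spaces and the number of digit characters.
theorem pvA_fold (l : List Char) (sp dg : Int) :
    l.foldl
      (fun acc c =>
        if c == ' ' then (acc.1 + 1, acc.2)
        else if PySem.Chars.isdigit c then (acc.1, acc.2 + 1)
        else acc)
      (sp, dg)
    = (sp + (l.countP (fun c => c == ' ') : Int),
       dg + (l.countP (fun c => PySem.Chars.isdigit c) : Int)) := by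
  induction l generalizing sp dg with
  | nil => simp
  | cons c l ih =>
    rw [List.foldl_cons]
    by_cases h : (c == ' ') = true
    · have hc : c = ' ' := by simpa using h
      subst hc
      rw [if_pos h, ih]
      simp [List.countP_cons, show PySem.Chars.isdigit ' ' = false from rfl, Prod.ext_iff]
      omega
    · rw [if_neg h]
      by_cases hd : PySem.Chars.isdigit c = true
      · rw [if_pos hd, ih]
        simp [List.countP_cons, h, hd, Prod.ext_iff]
        omega
      · rw [if_neg hd, ih]
        simp [List.countP_cons, h, hd, Prod.ext_iff]

-- B's filtered fold over pairs is an initial value plus a sum.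
theorem pvFold_if_sum (xs : List (Char × Int)) (a : Int) :
    xs.foldl (fun acc kv => if PySem.Chars.isdigit kv.1 then acc + kv.2 else acc) a
    = a + (xs.map (fun kv => if PySem.Chars.isdigit kv.1 then kv.2 else 0)).sum := by
  induction xs generalizing a with
  | nil => simp
  | cons kv xs ih =>
    by_cases h : PySem.Chars.isdigit kv.1 <;> simp [h, ih] <;> ring

-- countP splits across a boolean test.
theorem pvCountP_split (p q : Char → Bool) (l : List Char) :
    l.countP p
    = l.countP (fun a => p a && q a) + l.countP (fun a => p a && !(q a)) := by
  induction l with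
  | nil => simp
  | cons c l ih =>
    by_cases hp : p c <;> by_cases hq : q c <;>
      simp [List.countP_cons, hp, hq, ih] <;> omega

-- Summing per-key counts of l over a nodup cover of l's elements recovers countP.
theorem pvSum_counts (p : Char → Bool) (ks : List Char) :
    ∀ l : List Char, ks.Nodup → (∀ c ∈ l, c ∈ ks) →
      (ks.map (fun k => if p k then (l.count k : Int) else 0)).sum
        = (l.countP p : Int) := by
  induction ks with
  | nil =>
    intro l _ hcov
    have : l = [] := by
      cases l with
      | nil => rfl
      | cons c l => exact absurd (hcov c (by simp)) (by simp)
    simp [this]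
  | cons k ks ih =>
    intro l hnd hcov
    have hnd' : ks.Nodup := hnd.of_cons
    have hkn : k ∉ ks := by
      have := List.nodup_cons.mp hnd; exact this.1
    set l' := l.filter (fun a => !(a == k)) with hl'
    have hcov' : ∀ c ∈ l', c ∈ ks := by
      intro c hc
      have hmem : c ∈ l := List.mem_of_mem_filter hc
      have hne : c ≠ k := by
        have := List.of_mem_filter hc
        simpa using this
      have := hcov c hmem
      simp at this
      rcases this with h | h
      · exact absurd h hne
      · exact h
    have hrec := ih l' hnd' hcov'
    -- counts of keys other than k agree on l and l'
    have hcong : (ks.map (fun k' => if p k' then (l'.count k' : Int) else 0))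
        = ks.map (fun k' => if p k' then (l.count k' : Int) else 0) := by
      apply List.map_congr_left
      intro k' hk'
      have hne : k' ≠ k := fun h => hkn (h ▸ hk')
      have : l'.count k' = l.count k' := by
        rw [hl']
        exact List.count_filter (by simp [hne])
      rw [this]
    -- countP over l' in terms of l
    have hsplit := pvCountP_split p (fun a => a == k) l
    have hl'countP : l'.countP p = l.countP (fun a => p a && !(a == k)) := by
      rw [hl', List.countP_filter]
    -- the k-indexed summand
    have hcountk : l.countP (fun a => p a && a == k) = if p k then l.count k else 0 := by
      by_cases hpk : p k = true
      · rw [if_pos hpk]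
        unfold List.count
        apply List.countP_congr
        intro a _
        constructor
        · intro h; exact (Bool.and_eq_true _ _ |>.mp h).2
        · intro h
          have : a = k := by simpa using h
          subst this
          simp [hpk]
      · rw [if_neg hpk, List.countP_eq_zero]
        intro a ha
        simp only [Bool.and_eq_true, not_and]
        intro hpa hak
        have : a = k := by simpa using hak
        subst this
        exact absurd hpa hpk
    rw [List.map_cons, List.sum_cons, ← hcong, hrec, hl'countP, hsplit, hcountk]
    by_cases hpk : p k = true
    · simp only [hpk, if_true]
      push_cast
      ring
    · simp only [hpk, if_false]
      push_cast
      ring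

-- ===== VERDICT (by name: the statement is the Claim_ definition above) =====
theorem count_spaces_digits_spec : Claim_equal_count_spaces_digits := by
  intro s _
  unfold Spec_count_spaces_digits count_spaces_digits count_spaces_digits_alt
  set l := s.toList with hl
  rw [PySem.Dict.foldl_insert_getD_add_one_eq_counter]
  simp only [PySem.Dict.getD_counter, PySem.Dict.items_counter]
  rw [pvA_fold, pvFold_if_sum, List.map_map]
  have hsum := pvSum_counts (fun c => PySem.Chars.isdigit c) (PySem.Set.ofList l) l
      (PySem.Set.nodup_ofList l) (fun c hc => (PySem.Set.mem_ofList l c).mpr hc)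
  simp only [Prod.mk.injEq]
  constructor
  · rw [zero_add]
    congr 1
  · rw [zero_add, ← hsum]
    simp [Function.comp_def]
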